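-- pv_equiv track=rewrite | github.com/weihe13/Lee_code | Amazon/amazon.py | findMinimumCharacter
-- ===== SOURCE A (Python) =====
-- def findMinimumCharacter(searchWord, resultWord):
--     p1, p2 = 0, 0
--     n1, n2 = len(searchWord), len(resultWord)
--     while p1 < n1 and p2 < n2:
--         if searchWord[p1] == resultWord[p2]:
--             p2 += 1
--         p1 += 1
--     return n2 - p2
-- ===== SOURCE B (Python) =====
-- def findMinimumCharacter(searchWord, resultWord):
--     # Index searchWord once: per character, the ascending list of its positions;
--     # then match resultWord greedily by binary-searching each position list for
--     # the first occurrence at or after pos (no rescanning of searchWord).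
--     occ = {}
--     for i, ch in enumerate(searchWord):
--         occ.setdefault(ch, []).append(i)
--     pos = 0
--     matched = 0
--     for c in resultWord:
--         lst = occ.get(c, [])
--         if not lst or lst[-1] < pos:
--             break
--         lo, hi = 0, len(lst) - 1
--         while lo < hi:          # first index in lst with value >= pos
--             mid = (lo + hi) // 2
--             if lst[mid] < pos:
--                 lo = mid + 1
--             else:
--                 hi = mid
--         matched += 1
--         pos = lst[lo] + 1
--     return len(resultWord) - matched
-- ===== Notes on version B (the rewrite author's own statement) =====
-- stated objective: alternative
-- what changed: B first builds a per-character index of ascending position lists over searchWord in one pass, then matches resultWord by binary-searching each list for the first position >= pos, instead of A's single two-pointer scan over searchWord.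
import Mathlib
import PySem

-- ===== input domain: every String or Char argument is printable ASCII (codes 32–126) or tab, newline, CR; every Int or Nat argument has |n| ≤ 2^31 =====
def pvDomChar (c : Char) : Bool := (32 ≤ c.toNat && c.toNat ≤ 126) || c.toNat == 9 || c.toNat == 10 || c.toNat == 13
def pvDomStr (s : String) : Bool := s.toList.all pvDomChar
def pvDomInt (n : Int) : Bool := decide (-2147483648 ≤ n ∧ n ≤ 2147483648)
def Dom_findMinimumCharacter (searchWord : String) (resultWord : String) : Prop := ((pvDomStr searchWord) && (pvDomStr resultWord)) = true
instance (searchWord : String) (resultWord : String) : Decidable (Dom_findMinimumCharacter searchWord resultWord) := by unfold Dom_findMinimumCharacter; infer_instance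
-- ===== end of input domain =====

-- B replaces A's two-pointer scan over searchWord by a per-character index of
-- ascending position lists consulted by binary search (objective: alternative).

-- ===== PORT A =====
-- A's while loop over indices p1 (into searchWord) and p2 (into resultWord),
-- transcribed as structural recursion on the two character lists; the result
-- n2 - p2 is the number of resultWord characters still unmatched.
def goA : List Char → List Char → Nat
  | [], r => r.length
  | _ :: _, [] => 0
  | a :: s, c :: r => if a == c then goA s r else goA s (c :: r)

def findMinimumCharacter (searchWord : String) (resultWord : String) : Int :=
  (goA searchWord.toList resultWord.toList : Int)

-- ===== PORT B =====
-- occ.setdefault(ch, []).append(i) over enumerate(searchWord)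
def occBuild (s : List Char) : PySem.Dict Char (List Int) :=
  (PySem.List.enumerate s).foldl (fun d p => d.modify p.2 [] (· ++ [p.1])) PySem.Dict.empty

-- B's `while lo < hi` binary search for the first index of lst whose value is
-- >= pos; fuel-counted loop (any fuel ≥ hi - lo is exact, hi - lo shrinks each turn)
def bsearch (lst : List Int) (pos : Int) : Nat → Nat → Nat → Nat
  | 0, lo, _ => lo
  | n + 1, lo, hi =>
    if lo < hi then
      let mid := (lo + hi) / 2
      if PySem.List.pyGetD lst (mid : Int) 0 < pos then bsearch lst pos n (mid + 1) hi
      else bsearch lst pos n lo mid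
    else lo

-- B's for-loop over resultWord: lst = occ.get(c, []); break when lst is empty or
-- lst[-1] < pos; else pos = lst[lo] + 1 with lo from the binary search.
def goB (occ : PySem.Dict Char (List Int)) : List Char → Int → Nat → Nat
  | [], _, m => m
  | c :: r, pos, m =>
    if occ.getD c [] = [] then m
    else if PySem.List.pyGetD (occ.getD c []) (-1) 0 < pos then m
    else goB occ r
      (PySem.List.pyGetD (occ.getD c [])
        ((bsearch (occ.getD c []) pos (occ.getD c []).length 0 ((occ.getD c []).length - 1) : Nat) : Int) 0 + 1)
      (m + 1)

def findMinimumCharacter_alt (searchWord : String) (resultWord : String) : Int :=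
  (resultWord.toList.length : Int) - (goB (occBuild searchWord.toList) resultWord.toList 0 0 : Int)

-- ===== PRECONDITION & SPEC =====
def Spec_findMinimumCharacter (searchWord : String) (resultWord : String) (out : Int) : Prop := out = findMinimumCharacter_alt searchWord resultWord
instance (searchWord : String) (resultWord : String) (out : Int) : Decidable (Spec_findMinimumCharacter searchWord resultWord out) := by unfold Spec_findMinimumCharacter; infer_instance

-- ===== CLAIM (what is proved, stated in full; the proofs are below) =====
def Claim_equal_findMinimumCharacter : Prop := ∀ (searchWord : String) (resultWord : String), Dom_findMinimumCharacter searchWord resultWord → Spec_findMinimumCharacter searchWord resultWord (findMinimumCharacter searchWord resultWord)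

-- ===== LEMMAS AND PROOFS =====

-- first index of character c in a list (ghost function for the proof)
def fidx (c : Char) : List Char → Option Nat
  | [] => none
  | a :: s => if a == c then some 0 else (fidx c s).map (· + 1)

-- greedy match count, recursing on the result word, stepping by first indices
def cnt : List Char → List Char → Nat
  | _, [] => 0
  | s, c :: r =>
    match fidx c s with
    | none => 0
    | some i => 1 + cnt (s.drop (i + 1)) r

-- ghost: ascending list of positions of c in s
def posl (s : List Char) (c : Char) : List Int :=
  ((PySem.List.enumerate s).filter (fun p => p.2 == c)).map (·.1)

lemma fidx_lt_length {c : Char} {s : List Char} {i : Nat} (h : fidx c s = some i) :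
    i < s.length := by
  induction s generalizing i with
  | nil => simp [fidx] at h
  | cons a s ih =>
    by_cases hac : a == c
    · simp [fidx, hac] at h
      simp; omega
    · simp [fidx, hac] at h
      obtain ⟨j, hj, rfl⟩ := h
      have := ih hj
      simp; omega

lemma fidx_get {c : Char} {s : List Char} {i : Nat} (h : fidx c s = some i) :
    s[i]? = some c := by
  induction s generalizing i with
  | nil => simp [fidx] at h
  | cons a s ih =>
    by_cases hac : a == c
    · simp [fidx, hac] at h
      subst h
      simpa using (beq_iff_eq.mp hac)
    · simp [fidx, hac] at h
      obtain ⟨j, hj, rfl⟩ := h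
      simpa using ih hj

lemma fidx_min {c : Char} {s : List Char} {i : Nat} (h : fidx c s = some i) :
    ∀ j < i, s[j]? ≠ some c := by
  induction s generalizing i with
  | nil => simp [fidx] at h
  | cons a s ih =>
    by_cases hac : a == c
    · simp [fidx, hac] at h; omega
    · simp [fidx, hac] at h
      obtain ⟨k, hk, rfl⟩ := h
      intro j hj
      cases j with
      | zero => simpa using (by simpa using hac : ¬ a = c)
      | succ j => simpa using ih hk j (by omega)

lemma fidx_none {c : Char} {s : List Char} (h : fidx c s = none) : c ∉ s := by
  induction s with
  | nil => simp
  | cons a s ih =>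
    by_cases hac : a == c
    · simp [fidx, hac] at h
    · simp [fidx, hac] at h
      have hne : ¬ a = c := by simpa using hac
      simp only [List.mem_cons, not_or]
      exact ⟨fun hc => hne hc.symm, ih h⟩

-- A's scan consumes searchWord up to and past the first occurrence of c
lemma goA_cons (s : List Char) (c : Char) (r : List Char) :
    goA s (c :: r) =
      match fidx c s with
      | none => r.length + 1
      | some i => goA (s.drop (i + 1)) r := by
  induction s with
  | nil => simp [goA, fidx]
  | cons a s ih =>
    by_cases hac : a == c
    · simp [goA, fidx, hac]
    · simp only [goA, fidx, hac, if_false, Bool.false_eq_true]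
      rw [ih]
      cases h : fidx c s <;> simp

-- main invariant: A's remainder count plus the greedy match count is the length
lemma goA_add_cnt (r s : List Char) : goA s r + cnt s r = r.length := by
  induction r generalizing s with
  | nil => cases s <;> simp [goA, cnt]
  | cons c r ih =>
    rw [goA_cons, cnt]
    cases h : fidx c s with
    | none => simp
    | some i => simp [← ih (s.drop (i + 1))]; omega

lemma cnt_le_length (r s : List Char) : cnt s r ≤ r.length := by
  have := goA_add_cnt r s; omega

-- occBuild's value at c is the position list of c
lemma occBuild_getD (s : List Char) (c : Char) :
    (occBuild s).getD c [] = posl s c := by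
  unfold occBuild posl
  rw [show (PySem.List.enumerate s).foldl (fun d p => d.modify p.2 [] (· ++ [p.1])) PySem.Dict.empty
      = ((PySem.List.enumerate s).map Prod.swap).foldl (fun d q => d.modify q.1 [] (· ++ [q.2])) PySem.Dict.empty
      from by rw [List.foldl_map]; rfl]
  rw [PySem.Dict.getD_foldl_modify_append]
  simp [List.filter_map, Function.comp_def, List.map_map, Prod.swap]

-- posl membership: exactly the indices of c in s
lemma mem_posl {s : List Char} {c : Char} {x : Int} :
    x ∈ posl s c ↔ ∃ k : Nat, ∃ h : k < s.length, s[k] = c ∧ x = (k : Int) := by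
  unfold posl
  simp only [List.mem_map, List.mem_filter, PySem.List.mem_enumerate_iff]
  constructor
  · rintro ⟨p, ⟨⟨k, hk, rfl⟩, hc⟩, rfl⟩
    exact ⟨k, hk, by simpa using hc, by simp⟩
  · rintro ⟨k, hk, hc, rfl⟩
    exact ⟨((k : Int), s[k]), ⟨⟨k, hk, by simp⟩, by simpa using hc⟩, rfl⟩

-- posl is strictly ascending
lemma posl_sorted (s : List Char) (c : Char) : (posl s c).Pairwise (· < ·) := by
  unfold posl
  exact (((PySem.List.pairwise_lt_enumerate s 0).sublist List.filter_sublist).map _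
    (fun a b h => h))

lemma sorted_getD_le {lst : List Int} (hs : lst.Pairwise (· < ·)) {j k : Nat}
    (hk : k < lst.length) (hjk : j ≤ k) : lst.getD j 0 ≤ lst.getD k 0 := by
  rcases eq_or_lt_of_le hjk with rfl | h
  · exact le_refl _
  · have := List.pairwise_iff_getElem.mp hs j k (by omega) hk h
    rw [List.getD_eq_getElem _ _ (by omega), List.getD_eq_getElem _ _ hk]
    omega

-- binary-search invariant/spec
lemma bsearch_spec (lst : List Int) (pos : Int) (hs : lst.Pairwise (· < ·)) :
    ∀ (n lo hi : Nat), hi - lo ≤ n → hi < lst.length → lo ≤ hi →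
      (∀ j < lo, lst.getD j 0 < pos) → pos ≤ lst.getD hi 0 →
      lo ≤ bsearch lst pos n lo hi ∧ bsearch lst pos n lo hi ≤ hi ∧
      (∀ j < bsearch lst pos n lo hi, lst.getD j 0 < pos) ∧
      pos ≤ lst.getD (bsearch lst pos n lo hi) 0 := by
  intro n
  induction n with
  | zero =>
    intro lo hi hn hhi hlo hlow hhiv
    have : lo = hi := by omega
    subst this
    exact ⟨le_refl _, le_refl _, hlow, hhiv⟩
  | succ n ih =>
    intro lo hi hn hhi hlo hlow hhiv
    by_cases h : lo < hi
    · have hunf : bsearch lst pos (n + 1) lo hi =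
          if PySem.List.pyGetD lst (((lo + hi) / 2 : Nat) : Int) 0 < pos then
            bsearch lst pos n ((lo + hi) / 2 + 1) hi
          else bsearch lst pos n lo ((lo + hi) / 2) := by
        rw [bsearch]; simp only [if_pos h]
      rw [hunf]
      have hmid : (lo + hi) / 2 < hi := by omega
      have hmlo : lo ≤ (lo + hi) / 2 := by omega
      rw [PySem.List.pyGetD_natCast]
      by_cases hc : lst.getD ((lo + hi) / 2) 0 < pos
      · rw [if_pos hc]
        have hstep : ∀ j < (lo + hi) / 2 + 1, lst.getD j 0 < pos := fun j hj =>
          lt_of_le_of_lt (sorted_getD_le hs (by omega) (by omega)) hc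
        have := ih ((lo + hi) / 2 + 1) hi (by omega) hhi (by omega) hstep hhiv
        exact ⟨by omega, this.2.1, this.2.2⟩
      · rw [if_neg hc]
        have := ih lo ((lo + hi) / 2) (by omega) (by omega) hmlo hlow (by omega)
        exact ⟨this.1, by omega, this.2.2⟩
    · have hunf : bsearch lst pos (n + 1) lo hi = lo := by
        rw [bsearch]; simp only [if_neg h]
      rw [hunf]
      have : lo = hi := by omega
      subst this
      exact ⟨le_refl _, le_refl _, hlow, hhiv⟩

-- every element of posl is at most its last element (getD (length-1))
lemma mem_posl_le_last {s : List Char} {c : Char} {x : Int} (hx : x ∈ posl s c) :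
    x ≤ (posl s c).getD ((posl s c).length - 1) 0 := by
  obtain ⟨j, hj, rfl⟩ := List.mem_iff_getElem.mp hx
  rw [← List.getD_eq_getElem _ 0 hj]
  exact sorted_getD_le (posl_sorted s c) (by omega) (by omega)

-- B's loop computes m + the greedy count on the suffix s.drop pos
lemma goB_eq_cnt (s : List Char) (r : List Char) (pos : Int) (m : Nat) (hpos : 0 ≤ pos) :
    goB (occBuild s) r pos m = m + cnt (s.drop pos.toNat) r := by
  induction r generalizing pos m with
  | nil => simp [goB, cnt]
  | cons c r ih =>
    simp only [goB, occBuild_getD]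
    by_cases hnil : posl s c = []
    · rw [if_pos hnil]
      have hno : fidx c (s.drop pos.toNat) = none := by
        cases h : fidx c (s.drop pos.toNat) with
        | none => rfl
        | some i =>
          exfalso
          have hi := fidx_lt_length h
          have hg := fidx_get h
          rw [List.getElem?_drop] at hg
          have hlen : pos.toNat + i < s.length := by
            have : (s.drop pos.toNat).length = s.length - pos.toNat := List.length_drop; omega
          rw [List.getElem?_eq_getElem hlen] at hg
          have : ((pos.toNat + i : Nat) : Int) ∈ posl s c :=
            mem_posl.mpr ⟨pos.toNat + i, hlen, by simpa using hg, rfl⟩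
          simp [hnil] at this
      simp [cnt, hno]
    · rw [if_neg hnil]
      have hlen : 0 < (posl s c).length := List.length_pos_iff.mpr hnil
      have hsort := posl_sorted s c
      have hlast : PySem.List.pyGetD (posl s c) (-1) 0
          = (posl s c).getD ((posl s c).length - 1) 0 := by
        rw [PySem.List.pyGetD_neg_one _ 0 hnil, List.getLast_eq_getElem,
          List.getD_eq_getElem _ _ (by omega)]
      by_cases hbreak : PySem.List.pyGetD (posl s c) (-1) 0 < pos
      · rw [if_pos hbreak]
        have hno : fidx c (s.drop pos.toNat) = none := by
          cases h : fidx c (s.drop pos.toNat) with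
          | none => rfl
          | some i =>
            exfalso
            have hi := fidx_lt_length h
            have hg := fidx_get h
            rw [List.getElem?_drop] at hg
            have hlen2 : pos.toNat + i < s.length := by
              have : (s.drop pos.toNat).length = s.length - pos.toNat := List.length_drop; omega
            rw [List.getElem?_eq_getElem hlen2] at hg
            have hmem : ((pos.toNat + i : Nat) : Int) ∈ posl s c :=
              mem_posl.mpr ⟨pos.toNat + i, hlen2, by simpa using hg, rfl⟩
            have := mem_posl_le_last hmem
            rw [hlast] at hbreak
            omega
        simp [cnt, hno]
      · rw [if_neg hbreak]
        rw [hlast] at hbreak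
        -- the last element of posl is an occurrence of c at or after pos
        have hlastmem : (posl s c).getD ((posl s c).length - 1) 0 ∈ posl s c := by
          rw [List.getD_eq_getElem _ _ (by omega)]
          exact List.getElem_mem _
        -- hence c occurs in s.drop pos.toNat, so fidx is some
        have hsome : fidx c (s.drop pos.toNat) ≠ none := by
          intro h
          obtain ⟨k, hk, hkc, hkeq⟩ := mem_posl.mp hlastmem
          have hkpos : pos.toNat ≤ k := by omega
          have hmem : c ∈ s.drop pos.toNat := by
            rw [List.mem_iff_getElem]
            refine ⟨k - pos.toNat, by (have : (s.drop pos.toNat).length = s.length - pos.toNat := List.length_drop); omega, ?_⟩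
            rw [List.getElem_drop]
            simp only [show pos.toNat + (k - pos.toNat) = k from by omega]
            exact hkc
          exact fidx_none h hmem
        cases h : fidx c (s.drop pos.toNat) with
        | none => exact absurd h hsome
        | some i =>
          have hi := fidx_lt_length h
          have hg := fidx_get h
          rw [List.getElem?_drop] at hg
          have hleni : pos.toNat + i < s.length := by
            have : (s.drop pos.toNat).length = s.length - pos.toNat := List.length_drop; omega
          rw [List.getElem?_eq_getElem hleni] at hg
          have hgi : s[pos.toNat + i] = c := by simpa using hg
          have himem : ((pos.toNat + i : Nat) : Int) ∈ posl s c :=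
            mem_posl.mpr ⟨pos.toNat + i, hleni, hgi, rfl⟩
          obtain ⟨h0, hr1, hlow, hge⟩ :=
            bsearch_spec (posl s c) pos hsort ((posl s c).length) 0
              ((posl s c).length - 1) (by omega) (by omega) (by omega)
              (by omega) (by omega)
          set r0 := bsearch (posl s c) pos ((posl s c).length) 0 ((posl s c).length - 1) with hr0
          -- the found value is exactly pos.toNat + i
          have hvmem : (posl s c).getD r0 0 ∈ posl s c := by
            rw [List.getD_eq_getElem _ _ (by omega)]
            exact List.getElem_mem _
          obtain ⟨k₂, hk₂, hck₂, hkeq₂⟩ := mem_posl.mp hvmem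
          have hk₂pos : pos.toNat ≤ k₂ := by omega
          -- k₂ ≥ pos.toNat + i by minimality of fidx
          have hk₂ge : pos.toNat + i ≤ k₂ := by
            by_contra hlt
            have hidx : (s.drop pos.toNat)[k₂ - pos.toNat]? = some c := by
              rw [List.getElem?_drop,
                show pos.toNat + (k₂ - pos.toNat) = k₂ from by omega,
                List.getElem?_eq_getElem hk₂]
              simp [hck₂]
            exact fidx_min h (k₂ - pos.toNat) (by omega) hidx
          -- and ≤ pos.toNat + i since that value sits at some index and r0 is minimal
          have hk₂le : (posl s c).getD r0 0 ≤ ((pos.toNat + i : Nat) : Int) := by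
            obtain ⟨j₂, hj₂, hj₂eq⟩ := List.mem_iff_getElem.mp himem
            rw [← List.getD_eq_getElem _ 0 hj₂] at hj₂eq
            by_cases hjr : j₂ < r0
            · have := hlow j₂ hjr
              omega
            · calc (posl s c).getD r0 0 ≤ (posl s c).getD j₂ 0 :=
                    sorted_getD_le hsort (by omega) (by omega)
                _ = _ := hj₂eq
          have hval : (posl s c).getD r0 0 = ((pos.toNat + i : Nat) : Int) := by omega
          rw [PySem.List.pyGetD_natCast, hval]
          rw [ih _ _ (by positivity)]
          have htn : (((pos.toNat + i : Nat) : Int) + 1).toNat = pos.toNat + i + 1 := by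
            omega
          rw [htn]
          simp only [cnt, h, List.drop_drop]
          rw [show pos.toNat + (i + 1) = pos.toNat + i + 1 from by omega]
          omega

-- ===== VERDICT (by name: the statement is the Claim_ definition above) =====
theorem findMinimumCharacter_spec : Claim_equal_findMinimumCharacter := by
  intro s r _
  unfold Spec_findMinimumCharacter findMinimumCharacter findMinimumCharacter_alt
  rw [goB_eq_cnt s.toList r.toList 0 0 (by simp)]
  have h := goA_add_cnt r.toList s.toList
  have hle := cnt_le_length r.toList s.toList
  simp only [Int.toNat_zero, List.drop_zero, Nat.zero_add]
  omega
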